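-- pv_equiv track=rewrite | github.com/haru0707tyonn/hew02_SecondChaceWebapp | app.py | get_user_rank
-- ===== SOURCE A (Python) =====
-- def get_user_rank(total_amount):
--     gauge_ranges = [
--         { 'max': 10000, 'color': '#3498db', 'image': 'rank1.png', 'name': 'ブロンズ' },
--         { 'max': 30000, 'color': '#2ecc71', 'image': 'rank2.png', 'name': 'シルバー' },
--         { 'max': 50000, 'color': '#f39c12', 'image': 'rank3.png', 'name': 'ゴールド' },
--         { 'max': 100000, 'color': '#e74c3c', 'image': 'rank4.png', 'name': 'プラチナ' },
--     ]
--
--     for i, rank in enumerate(gauge_ranges):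
--         if total_amount <= rank['max']:
--             return i
-- ===== SOURCE B (Python) =====
-- def get_user_rank(total_amount):
--     thresholds = [10000, 30000, 50000, 100000]
--     lo, hi = 0, len(thresholds)
--     while lo < hi:
--         mid = (lo + hi) // 2
--         if thresholds[mid] < total_amount:
--             lo = mid + 1
--         else:
--             hi = mid
--     return None if lo == len(thresholds) else lo
-- ===== Notes on version B (the rewrite author's own statement) =====
-- stated objective: alternative
-- what changed: Replaces the linear scan over rank dicts with a hand-written binary search (bisect_left) over a bare thresholds list, mapping the out-of-range index to None.
import Mathlib
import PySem

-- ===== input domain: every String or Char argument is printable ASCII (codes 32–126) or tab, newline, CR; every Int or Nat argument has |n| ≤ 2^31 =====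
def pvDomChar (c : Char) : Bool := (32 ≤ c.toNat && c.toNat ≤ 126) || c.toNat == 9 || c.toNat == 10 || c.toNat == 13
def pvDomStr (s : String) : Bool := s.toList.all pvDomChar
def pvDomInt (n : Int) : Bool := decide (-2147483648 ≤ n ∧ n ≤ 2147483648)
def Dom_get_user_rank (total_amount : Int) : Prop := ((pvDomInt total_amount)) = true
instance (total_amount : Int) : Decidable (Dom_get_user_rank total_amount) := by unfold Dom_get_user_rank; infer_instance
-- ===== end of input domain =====

-- B replaces A's linear scan over rank dicts with a binary search over the bare thresholds list (alternative algorithm, same values).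

-- ===== PORT A =====
-- each Python rank dict becomes a record with its four fields; only `max` is read
structure PvRank where
  max : Int
  color : String
  image : String
  name : String
deriving Repr, DecidableEq

def pvGaugeRanges : List PvRank :=
  [ ⟨10000, "#3498db", "rank1.png", "ブロンズ"⟩,
    ⟨30000, "#2ecc71", "rank2.png", "シルバー"⟩,
    ⟨50000, "#f39c12", "rank3.png", "ゴールド"⟩,
    ⟨100000, "#e74c3c", "rank4.png", "プラチナ"⟩ ]

-- the for-loop with early return, over enumerate(gauge_ranges)
def pvScan (total_amount : Int) : List (Int × PvRank) → Option Int
  | [] => none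
  | (i, rank) :: rest =>
      if total_amount ≤ rank.max then some i else pvScan total_amount rest

def get_user_rank (total_amount : Int) : Option Int :=
  pvScan total_amount (PySem.List.enumerate pvGaugeRanges)

-- ===== PORT B =====
-- hand-written bisect_left loop from Source B, recursion on hi - lo
def pvBisectLeft (a : List Int) (x : Int) (lo hi : Nat) : Nat :=
  if _h : lo < hi then
    let mid := (lo + hi) / 2
    if a.getD mid 0 < x then pvBisectLeft a x (mid + 1) hi
    else pvBisectLeft a x lo mid
  else lo
termination_by hi - lo
decreasing_by all_goals omega

def get_user_rank_alt (total_amount : Int) : Option Int :=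
  let thresholds : List Int := [10000, 30000, 50000, 100000]
  let lo := pvBisectLeft thresholds total_amount 0 thresholds.length
  if lo = thresholds.length then none else some (Int.ofNat lo)

-- ===== PRECONDITION & SPEC =====
def Spec_get_user_rank (total_amount : Int) (out : Option Int) : Prop := out = get_user_rank_alt total_amount
instance (total_amount : Int) (out : Option Int) : Decidable (Spec_get_user_rank total_amount out) := by unfold Spec_get_user_rank; infer_instance

-- ===== CLAIM (what is proved, stated in full; the proofs are below) =====
def Claim_equal_get_user_rank : Prop := ∀ (total_amount : Int), Dom_get_user_rank total_amount → Spec_get_user_rank total_amount (get_user_rank total_amount)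

-- ===== LEMMAS AND PROOFS =====

-- ===== VERDICT (by name: the statement is the Claim_ definition above) =====
theorem get_user_rank_spec : Claim_equal_get_user_rank := by
  intro t _
  unfold Spec_get_user_rank get_user_rank get_user_rank_alt
  by_cases h1 : t ≤ 10000
  · have g1 : ¬ (10000:Int) < t := by omega
    have g2 : ¬ (30000:Int) < t := by omega
    have g3 : ¬ (50000:Int) < t := by omega
    simp [pvScan, PySem.List.enumerate, pvGaugeRanges, pvBisectLeft, h1, g1, g2, g3]
  · by_cases h2 : t ≤ 30000
    · have g1 : (10000:Int) < t := by omega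
      have g2 : ¬ (30000:Int) < t := by omega
      have g3 : ¬ (50000:Int) < t := by omega
      simp [pvScan, PySem.List.enumerate, pvGaugeRanges, pvBisectLeft, h1, h2, g1, g2, g3]
    · by_cases h3 : t ≤ 50000
      · have g2 : (30000:Int) < t := by omega
        have g3 : ¬ (50000:Int) < t := by omega
        simp [pvScan, PySem.List.enumerate, pvGaugeRanges, pvBisectLeft, h1, h2, h3, g2, g3]
      · by_cases h4 : t ≤ 100000
        · have g3 : (50000:Int) < t := by omega
          have g4 : ¬ (100000:Int) < t := by omega
          simp [pvScan, PySem.List.enumerate, pvGaugeRanges, pvBisectLeft, h1, h2, h3, h4, g3, g4]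
        · have g3 : (50000:Int) < t := by omega
          have g4 : (100000:Int) < t := by omega
          simp [pvScan, PySem.List.enumerate, pvGaugeRanges, pvBisectLeft, h1, h2, h3, h4, g3, g4]
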